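-- pv_equiv track=rewrite | github.com/SaturnRoccat/Uranium-235 | Meltdown/jsonhandling.py | semverStringToNumber
-- ===== SOURCE A (Python) =====
-- def semverStringToNumber(semver: str):
--     semverNoPrefix = semver[1:]
--     semverSplit = semverNoPrefix.split(".")
--     semverSplit.reverse()
--     semverNumber = 0
--     for index, value in enumerate(semverSplit):
--         # bit shift by 16 bits
--         semverNumber += int(value) << (index * 16)
--     return semverNumber
-- ===== SOURCE B (Python) =====
-- def semverStringToNumber(semver: str):
--     # Horner's method: fold left over the components, shifting the accumulator.
--     result = 0
--     for value in semver[1:].split("."):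
--         result = (result << 16) + int(value)
--     return result
-- ===== Notes on version B (the rewrite author's own statement) =====
-- stated objective: simpler
-- what changed: Replaces reverse + enumerate + per-index shifts (int(v) << (i*16)) with a single forward Horner fold result = (result << 16) + int(v); no reverse, no index bookkeeping.
import Mathlib
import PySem

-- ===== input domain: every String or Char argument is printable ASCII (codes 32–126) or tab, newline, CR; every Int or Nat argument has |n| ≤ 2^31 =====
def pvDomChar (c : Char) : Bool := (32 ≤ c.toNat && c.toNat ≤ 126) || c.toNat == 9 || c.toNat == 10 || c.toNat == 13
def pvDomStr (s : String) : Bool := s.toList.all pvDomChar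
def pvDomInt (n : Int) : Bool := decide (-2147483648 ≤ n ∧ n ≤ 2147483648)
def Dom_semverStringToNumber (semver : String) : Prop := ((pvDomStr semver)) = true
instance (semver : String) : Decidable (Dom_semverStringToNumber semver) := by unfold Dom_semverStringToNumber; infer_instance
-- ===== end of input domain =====

-- B replaces reverse + enumerate + per-index shifts by a forward Horner fold (simpler; same cost).

-- ===== PORT A =====
def semverStringToNumber (semver : String) : Int :=
  let semverNoPrefix := PySem.Str.slice semver (some 1) none
  let semverSplit := (PySem.Str.split? semverNoPrefix ".").getD []   -- sep "." ≠ "": always some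
  let rev := semverSplit.reverse
  (PySem.List.enumerate rev 0).foldl
    (fun semverNumber p =>
      semverNumber + ((PySem.Int.ofStr? p.2).getD 0) <<< ((p.1 * 16).toNat)) 0
  -- int(value) raises ValueError on non-int parts: excluded by Pre_; getD 0 is the total form.
  -- enumerate indices are ≥ 0, so .toNat on the shift amount is exact.

-- ===== PORT B =====
def semverStringToNumber_alt (semver : String) : Int :=
  ((PySem.Str.split? (PySem.Str.slice semver (some 1) none) ".").getD []).foldl
    (fun result value => (result <<< (16:Nat)) + (PySem.Int.ofStr? value).getD 0) 0

-- ===== PRECONDITION & SPEC =====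
-- Pre_ excludes exactly the inputs where some dot-separated component of the string after the first character is not int()-parseable,
-- on which the Python A raises ValueError.
def Pre_semverStringToNumber (semver : String) : Prop :=
  ∀ v ∈ (PySem.Str.split? (PySem.Str.slice semver (some 1) none) ".").getD [],
    (PySem.Int.ofStr? v).isSome = true
instance (semver : String) : Decidable (Pre_semverStringToNumber semver) := by
  unfold Pre_semverStringToNumber; infer_instance
def pvWitness_semverStringToNumber : String := "v1.2.3"
def Spec_semverStringToNumber (semver : String) (out : Int) : Prop := out = semverStringToNumber_alt semver
instance (semver : String) (out : Int) : Decidable (Spec_semverStringToNumber semver out) := by unfold Spec_semverStringToNumber; infer_instance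

-- ===== CLAIM (what is proved, stated in full; the proofs are below) =====
def Claim_equal_semverStringToNumber : Prop := ∀ (semver : String), Dom_semverStringToNumber semver → Pre_semverStringToNumber semver → Spec_semverStringToNumber semver (semverStringToNumber semver)

-- ===== LEMMAS AND PROOFS =====

-- parsed value of one component (shared by both ports)
def pvVal (v : String) : Int := (PySem.Int.ofStr? v).getD 0

-- Nat.shiftLeft' true m n + 1 = (m+1) * 2^n (used for the negative case of the Int shift)
lemma shiftLeft'_true_succ (m n : Nat) : Nat.shiftLeft' true m n + 1 = (m+1) * 2^n := by
  induction n with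
  | zero => simp [Nat.shiftLeft']
  | succ k ih =>
    rw [Nat.shiftLeft', Nat.bit]
    simp only [pow_succ, cond_true, ← mul_assoc]
    omega

-- Python's a << n (Int shift amount, here always a Nat cast) is multiplication by 2^n
lemma shiftLeft_intCast (a : Int) (n : Nat) : a <<< ((n:Int)) = a * 2 ^ n := by
  rcases a with m | m
  · show ((Nat.shiftLeft' false m n : Nat) : Int) = _
    rw [Nat.shiftLeft'_false, Nat.shiftLeft_eq]
    push_cast
    rfl
  · show Int.negSucc (Nat.shiftLeft' true m n) = _
    have h2 : ((Nat.shiftLeft' true m n : Nat) : Int) + 1 = ((m:Int)+1) * 2^n := by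
      exact_mod_cast congrArg (Nat.cast : Nat → Int) (shiftLeft'_true_succ m n)
    rw [Int.negSucc_eq, Int.negSucc_eq]
    push_cast at h2 ⊢
    linarith [h2]

-- B's fold from an arbitrary accumulator
lemma horner_foldl_acc (ys : List String) (acc : Int) :
    ys.foldl (fun (r : Int) v => (r <<< (16:Nat)) + pvVal v) acc
      = acc * (2 ^ 16) ^ ys.length + ys.foldl (fun (r : Int) v => (r <<< (16:Nat)) + pvVal v) 0 := by
  induction ys generalizing acc with
  | nil => simp
  | cons a t ih =>
    simp only [List.foldl_cons, List.length_cons]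
    rw [ih (acc <<< (16:Nat) + pvVal a), ih ((0:Int) <<< (16:Nat) + pvVal a)]
    simp [Int.shiftLeft_eq]
    ring

-- the core: A's reversed enumerated sum = B's Horner fold
lemma rev_enum_eq_horner (ys : List String) :
    (PySem.List.enumerate ys.reverse 0).foldl
        (fun (acc : Int) p => acc + (pvVal p.2) <<< ((p.1 * 16).toNat)) 0
      = ys.foldl (fun (r : Int) v => (r <<< (16:Nat)) + pvVal v) 0 := by
  induction ys with
  | nil => simp
  | cons a t ih =>
    have h : (a :: t).reverse = t.reverse ++ [a] := by simp
    rw [h, PySem.List.enumerate_append, List.foldl_append, ih]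
    simp only [PySem.List.enumerate, List.foldl_cons, List.foldl_nil, List.length_reverse]
    rw [horner_foldl_acc t ((0:Int) <<< (16:Nat) + pvVal a)]
    have hn : (((0:Int) + (t.length : Int)) * 16).toNat = t.length * 16 := by omega
    rw [hn, shiftLeft_intCast, mul_comm t.length 16, pow_mul]
    norm_num [Int.shiftLeft_eq]
    ring

-- ===== VERDICT (by name: the statement is the Claim_ definition above) =====
theorem semverStringToNumber_spec : Claim_equal_semverStringToNumber := by
  intro semver _ _
  unfold Spec_semverStringToNumber semverStringToNumber semverStringToNumber_alt
  exact rev_enum_eq_horner _
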